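-- pv_equiv track=rewrite | github.com/stella0306/geekbench-browser-api | Project1/geekbench/http_client/http_json_parser.py | _paginate_data
-- ===== SOURCE A (Python) =====
-- def _paginate_data(data: dict) -> dict:
--     """
--     데이터를 페이지 구조로 변환합니다.
--
--     :param data: 합쳐진 데이터
--     :return: 페이지 구조로 변환된 데이터
--     """
--     paginated_data = dict()
--     page_number = 0
--     item_count = 0  # 항목 카운트 초기화
--
--     for query, results in data.items():
--         if query not in paginated_data:
--             paginated_data[query] = dict()
--
--         for result_url, result_details in results.items():
--             # 25개마다 페이지 번호 증가
--             if item_count % 25 == 0: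
--                 page_number += 1
--
--             # 항목 카운트 증가
--             item_count += 1
--
--             # 페이지 번호에 데이터 저장
--             if page_number not in paginated_data[query]:
--                 paginated_data[query][page_number] = dict()
--
--             # 데이터 추가
--             paginated_data[query][page_number][result_url] = result_details
--
--     return paginated_data
-- ===== SOURCE B (Python) =====
-- def _paginate_data(data: dict) -> dict:
--     """
--     데이터를 페이지 구조로 변환합니다.
--
--     :param data: 합쳐진 데이터
--     :return: 페이지 구조로 변환된 데이터
--     """
--     paginated_data = {}
--     offset = 0  # global item index across all queries
--     for query, results in data.items():
--         items = list(results.items())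
--         pages = {}
--         i = 0
--         while i < len(items):
--             # page containing global index offset+i; chunk runs to that page's end
--             page = (offset + i) // 25 + 1
--             take = 25 - (offset + i) % 25
--             pages[page] = dict(items[i:i + take])
--             i += take
--         paginated_data[query] = pages
--         offset += len(items)
--     return paginated_data
-- ===== Notes on version B (the rewrite author's own statement) =====
-- stated objective: alternative
-- what changed: B pre-slices each query's items into whole page chunks of 25 - offset % 25 items, computing the page index by the closed form offset // 25 + 1 and building each page dict at once, instead of A's per-item global counter with a modulo-triggered page increment and per-item nested setdefault-style updates.
import Mathlib
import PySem

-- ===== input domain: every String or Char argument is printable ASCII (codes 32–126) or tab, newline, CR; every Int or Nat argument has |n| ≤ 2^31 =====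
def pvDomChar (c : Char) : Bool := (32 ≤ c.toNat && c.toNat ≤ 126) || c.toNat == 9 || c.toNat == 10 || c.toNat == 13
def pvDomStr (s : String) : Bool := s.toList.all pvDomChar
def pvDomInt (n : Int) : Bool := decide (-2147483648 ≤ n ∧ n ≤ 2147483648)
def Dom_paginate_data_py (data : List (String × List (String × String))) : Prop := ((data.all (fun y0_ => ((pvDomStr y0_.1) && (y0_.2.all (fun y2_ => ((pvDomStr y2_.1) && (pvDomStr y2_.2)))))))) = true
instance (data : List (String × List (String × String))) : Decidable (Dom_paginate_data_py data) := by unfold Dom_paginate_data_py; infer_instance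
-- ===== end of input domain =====

-- B groups each query's items into whole page chunks (25 - offset % 25 at a time) with the
-- closed-form page index offset // 25 + 1, instead of A's per-item counter with a modulo
-- branch and per-item dict updates; objective: alternative.

-- ===== PORT A =====
-- state of A's loops: (paginated_data, page_number, item_count)

def pvA_item (query : String)
    (st : PySem.Dict String (PySem.Dict Int (PySem.Dict String String)) × Int × Int)
    (it : String × String) :
    PySem.Dict String (PySem.Dict Int (PySem.Dict String String)) × Int × Int :=
  let pn := if PySem.Int.mod st.2.2 25 == 0 then st.2.1 + 1 else st.2.1
  let ic := st.2.2 + 1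
  let pd := if (st.1.getD query PySem.Dict.empty).contains pn then st.1
            else st.1.modify query PySem.Dict.empty (fun qd => qd.insert pn PySem.Dict.empty)
  let pd := pd.modify query PySem.Dict.empty
              (fun qd => qd.modify pn PySem.Dict.empty (fun m => m.insert it.1 it.2))
  (pd, pn, ic)

def pvA_query (st : PySem.Dict String (PySem.Dict Int (PySem.Dict String String)) × Int × Int)
    (qr : String × PySem.Dict String String) :
    PySem.Dict String (PySem.Dict Int (PySem.Dict String String)) × Int × Int :=
  let pd := if st.1.contains qr.1 then st.1 else st.1.insert qr.1 PySem.Dict.empty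
  qr.2.items.foldl (pvA_item qr.1) (pd, st.2.1, st.2.2)

def paginate_data_py (data : List (String × List (String × String))) :
    List (String × List (Int × List (String × String))) :=
  let d : PySem.Dict String (PySem.Dict String String) :=
    PySem.Dict.ofList (data.map (fun p => (p.1, PySem.Dict.ofList p.2)))
  let st := d.items.foldl pvA_query (PySem.Dict.empty, 0, 0)
  st.1.items.map (fun p => (p.1, p.2.items.map (fun pm => (pm.1, pm.2.items))))

-- ===== PORT B =====
-- the `while i < len(items)` loop of B: remaining items, current global offset, pages built so far

def pvB_pages (items : List (String × String)) (off : Nat)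
    (pages : PySem.Dict Int (PySem.Dict String String)) :
    PySem.Dict Int (PySem.Dict String String) :=
  match items with
  | [] => pages
  | it :: rest =>
    let take := 25 - off % 25
    let page : Int := (off / 25 : Nat) + 1
    pvB_pages ((it :: rest).drop take) (off + take)
      (pages.insert page (PySem.Dict.ofList ((it :: rest).take take)))
termination_by items.length
decreasing_by simp; omega

def pvB_query (st : PySem.Dict String (PySem.Dict Int (PySem.Dict String String)) × Nat)
    (qr : String × PySem.Dict String String) :
    PySem.Dict String (PySem.Dict Int (PySem.Dict String String)) × Nat :=
  (st.1.insert qr.1 (pvB_pages qr.2.items st.2 PySem.Dict.empty), st.2 + qr.2.items.length)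

def paginate_data_py_alt (data : List (String × List (String × String))) :
    List (String × List (Int × List (String × String))) :=
  let d : PySem.Dict String (PySem.Dict String String) :=
    PySem.Dict.ofList (data.map (fun p => (p.1, PySem.Dict.ofList p.2)))
  let st := d.items.foldl pvB_query (PySem.Dict.empty, 0)
  st.1.items.map (fun p => (p.1, p.2.items.map (fun pm => (pm.1, pm.2.items))))

-- ===== PRECONDITION & SPEC =====
def Spec_paginate_data_py (data : List (String × List (String × String))) (out : List (String × List (Int × List (String × String)))) : Prop := out = paginate_data_py_alt data
instance (data : List (String × List (String × String))) (out : List (String × List (Int × List (String × String)))) : Decidable (Spec_paginate_data_py data out) := by unfold Spec_paginate_data_py; infer_instance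

-- ===== CLAIM (what is proved, stated in full; the proofs are below) =====
def Claim_equal_paginate_data_py : Prop := ∀ (data : List (String × List (String × String))), Dom_paginate_data_py data → Spec_paginate_data_py data (paginate_data_py data)

-- ===== LEMMAS AND PROOFS =====

def pvPageOf (o : Nat) : Int := (o / 25 : Nat) + 1

def pvPnOf (o : Nat) : Int := ((o + 24) / 25 : Nat)

def pvQdStep (st : PySem.Dict Int (PySem.Dict String String) × Int × Int)
    (it : String × String) : PySem.Dict Int (PySem.Dict String String) × Int × Int :=
  let pn := if PySem.Int.mod st.2.2 25 == 0 then st.2.1 + 1 else st.2.1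
  let ic := st.2.2 + 1
  let qd := if st.1.contains pn then st.1 else st.1.insert pn PySem.Dict.empty
  (qd.modify pn PySem.Dict.empty (fun m => m.insert it.1 it.2), pn, ic)

theorem pv_ofList_nodup {κ ν : Type} [BEq κ] [LawfulBEq κ] (l : List (κ × ν))
    (h : (l.map Prod.fst).Nodup) : PySem.Dict.ofList l = PySem.Dict.mk l := by
  apply PySem.Dict.ext
  show (List.foldl (fun acc p => acc.insert p.1 p.2) PySem.Dict.empty l).items = l
  rw [PySem.Dict.items_foldl_insert_fresh l Prod.fst Prod.snd PySem.Dict.empty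
    (fun a _ => by simp [PySem.Dict.contains_empty]) h]
  simp [PySem.Dict.empty]

theorem pv_contains_append_last {ν : Type} (l : List (Int × ν)) (p : Int) (m : ν) :
    (PySem.Dict.mk (l ++ [(p, m)])).contains p = true := by
  simp [PySem.Dict.contains_mk]

theorem pv_get?_append_last {ν : Type} (l : List (Int × ν)) (p : Int) (m : ν)
    (h : ∀ k ∈ l.map Prod.fst, k ≠ p) :
    (PySem.Dict.mk (l ++ [(p, m)])).get? p = some m := by
  induction l with
  | nil => simp [PySem.Dict.get?_mk_cons]
  | cons x xs ih =>
    have hx : x.1 ≠ p := h x.1 (by simp)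
    rw [List.cons_append, PySem.Dict.get?_mk_cons]
    simp only [beq_iff_eq, hx, if_false]
    exact ih (fun k hk => h k (by simp [hk]))

theorem pv_getD_append_last {ν : Type} (l : List (Int × ν)) (p : Int) (m d0 : ν)
    (h : ∀ k ∈ l.map Prod.fst, k ≠ p) :
    (PySem.Dict.mk (l ++ [(p, m)])).getD p d0 = m := by
  rw [PySem.Dict.getD_eq_get?_getD, pv_get?_append_last l p m h]; rfl

theorem pv_insert_append_last {ν : Type} (l : List (Int × ν)) (p : Int) (m w : ν)
    (h : ∀ k ∈ l.map Prod.fst, k ≠ p) :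
    (PySem.Dict.mk (l ++ [(p, m)])).insert p w = PySem.Dict.mk (l ++ [(p, w)]) := by
  apply PySem.Dict.ext
  rw [PySem.Dict.items_insert_of_contains _ _ (pv_contains_append_last l p m)]
  show List.map _ (l ++ [(p, m)]) = _
  rw [List.map_append]
  congr 1
  · conv_rhs => rw [show l = List.map id l by simp]
    refine List.map_congr_left (fun x hx => ?_)
    have : x.1 ≠ p := h x.1 (List.mem_map_of_mem hx)
    simp [this]
  · simp

theorem pv_contains_lt {ν : Type} (qd : PySem.Dict Int ν) (p : Int)
    (h : ∀ k ∈ qd.keys, k < p) : qd.contains p = false := by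
  by_contra hc
  have : qd.contains p = true := by revert hc; cases qd.contains p <;> simp
  have := (PySem.Dict.contains_iff_mem_keys qd p).mp this
  exact absurd (h p this) (lt_irrefl p)

theorem pv_pageOf_bound (o : Nat) : pvPageOf (o + (25 - o % 25)) = pvPageOf o + 1 := by
  simp only [pvPageOf]
  have : (o + (25 - o % 25)) / 25 = o / 25 + 1 := by omega
  rw [this]; push_cast; ring

theorem pv_pages_acc (n : Nat) : ∀ (items : List (String × String)), items.length ≤ n →
    ∀ (off : Nat) (pages : PySem.Dict Int (PySem.Dict String String)),
    (∀ k ∈ pages.keys, k < pvPageOf off) →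
    pvB_pages items off pages = PySem.Dict.mk (pages.items ++ (pvB_pages items off PySem.Dict.empty).items) := by
  induction n with
  | zero =>
    intro items hlen off pages _
    have : items = [] := List.eq_nil_of_length_eq_zero (Nat.le_zero.mp hlen)
    subst this
    simp [pvB_pages, PySem.Dict.empty]
  | succ n ih =>
    intro items hlen off pages hk
    match items with
    | [] => simp [pvB_pages, PySem.Dict.empty]
    | it :: rest =>
      rw [pvB_pages, pvB_pages]
      set t := 25 - off % 25 with ht
      set page : Int := ((off / 25 : Nat) : Int) + 1 with hpage
      set chunk := PySem.Dict.ofList ((it :: rest).take t) with hchunk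
      have hpageOf : page = pvPageOf off := by simp [pvPageOf, hpage]
      have hcf : pages.contains page = false := pv_contains_lt pages page (by rw [hpageOf]; exact hk)
      have hins : pages.insert page chunk = PySem.Dict.mk (pages.items ++ [(page, chunk)]) := by
        apply PySem.Dict.ext
        rw [PySem.Dict.items_insert_of_not_contains _ _ hcf]
      have hins0 : PySem.Dict.empty.insert page chunk = PySem.Dict.mk [(page, chunk)] := by
        apply PySem.Dict.ext
        rw [PySem.Dict.items_insert_of_not_contains _ _ (by simp [PySem.Dict.contains_empty])]
        simp [PySem.Dict.empty]
      have hlen' : ((it :: rest).drop t).length ≤ n := by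
        simp only [List.length_drop] at *
        have : t ≥ 1 := by omega
        simp at hlen ⊢
        omega
      have hkeys' : ∀ k ∈ (PySem.Dict.mk (pages.items ++ [(page, chunk)])).keys, k < pvPageOf (off + t) := by
        intro k hkmem
        rw [ht, pv_pageOf_bound off]
        simp only [PySem.Dict.keys, List.map_append, List.mem_append, List.map_cons] at hkmem
        rcases hkmem with h1 | h2
        · have := hk k h1
          omega
        · simp at h2
          rw [h2, hpageOf]
          omega
      have hkeys1 : ∀ k ∈ (PySem.Dict.mk [(page, chunk)]).keys, k < pvPageOf (off + t) := by
        intro k hkmem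
        rw [ht, pv_pageOf_bound off]
        simp [PySem.Dict.keys] at hkmem
        rw [hkmem, hpageOf]; omega
      rw [hins, hins0]
      rw [ih _ hlen' (off + t) _ hkeys', ih _ hlen' (off + t) _ hkeys1]
      apply PySem.Dict.ext
      simp

theorem pv_mod_cast (o : Nat) : PySem.Int.mod (o : Int) 25 = ((o % 25 : Nat) : Int) := by
  rw [PySem.Int.mod_eq_emod_of_pos (by norm_num)]
  omega

theorem pv_pn_step (o : Nat) :
    (if (PySem.Int.mod (o : Int) 25 == 0) = true then pvPnOf o + 1 else pvPnOf o) = pvPageOf o := by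
  rw [pv_mod_cast]
  simp only [pvPnOf, pvPageOf, beq_iff_eq]
  by_cases h : o % 25 = 0 <;> simp [h] <;> omega

theorem pv_pageOf_succ_pn (o : Nat) : pvPageOf o = pvPnOf (o + 1) := by
  simp only [pvPageOf, pvPnOf]
  omega

theorem pv_pn_eq_page (o : Nat) (h : o % 25 ≠ 0) : pvPnOf o = pvPageOf o := by
  simp only [pvPageOf, pvPnOf]
  omega

theorem pv_pageOf_succ_eq (o : Nat) (h : (o + 1) % 25 ≠ 0) : pvPageOf (o + 1) = pvPageOf o := by
  simp only [pvPageOf]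
  omega

theorem pv_keys_ne {ν : Type} (qd : PySem.Dict Int ν) (p : Int)
    (h : ∀ k ∈ qd.keys, k < p) : ∀ k ∈ qd.items.map Prod.fst, k ≠ p := by
  intro k hk
  have : k ∈ qd.keys := by
    simp only [PySem.Dict.keys]
    simpa using hk
  exact ne_of_lt (h k this)

theorem pv_insert_empty {κ ν : Type} [BEq κ] (k : κ) (v : ν) :
    (PySem.Dict.empty : PySem.Dict κ ν).insert k v = PySem.Dict.mk [(k, v)] := by
  apply PySem.Dict.ext
  rw [PySem.Dict.items_insert_of_not_contains _ _ (by simp [PySem.Dict.contains_empty])]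
  simp [PySem.Dict.empty]

theorem pv_qdstep_fresh (o : Nat) (qd : PySem.Dict Int (PySem.Dict String String))
    (hk : ∀ k ∈ qd.keys, k < pvPageOf o) (it : String × String) :
    pvQdStep (qd, pvPnOf o, (o : Int)) it =
      (PySem.Dict.mk (qd.items ++ [(pvPageOf o, PySem.Dict.mk [it])]), pvPnOf (o + 1), ((o + 1 : Nat) : Int)) := by
  rw [← pv_pageOf_succ_pn o]
  simp only [pvQdStep, pv_pn_step]
  have hc : qd.contains (pvPageOf o) = false := pv_contains_lt qd _ hk
  rw [hc]
  simp only [Bool.false_eq_true, if_false, PySem.Dict.modify]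
  rw [PySem.Dict.getD_insert_self, PySem.Dict.insert_insert_self]
  refine Prod.ext ?_ (by simp)
  show qd.insert (pvPageOf o) (PySem.Dict.empty.insert it.1 it.2) = _
  rw [pv_insert_empty]
  apply PySem.Dict.ext
  rw [PySem.Dict.items_insert_of_not_contains _ _ hc]

theorem pv_qdstep_cont (o : Nat) (qd : PySem.Dict Int (PySem.Dict String String))
    (m : PySem.Dict String String) (ho : o % 25 ≠ 0)
    (hk : ∀ k ∈ qd.keys, k < pvPageOf o) (it : String × String)
    (hm : m.contains it.1 = false) :
    pvQdStep (PySem.Dict.mk (qd.items ++ [(pvPageOf o, m)]), pvPnOf o, (o : Int)) it =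
      (PySem.Dict.mk (qd.items ++ [(pvPageOf o, PySem.Dict.mk (m.items ++ [it]))]), pvPnOf (o + 1), ((o + 1 : Nat) : Int)) := by
  rw [← pv_pageOf_succ_pn o]
  have hne := pv_keys_ne qd (pvPageOf o) hk
  simp only [pvQdStep, pv_mod_cast]
  have hcond : ((((o % 25 : Nat) : Int)) == 0) = false := by
    simp only [beq_eq_false_iff_ne, ne_eq, Nat.cast_eq_zero]
    omega
  rw [hcond]
  simp only [Bool.false_eq_true, if_false, pv_pn_eq_page o ho]
  rw [pv_contains_append_last]
  simp only [if_true, PySem.Dict.modify]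
  rw [pv_getD_append_last _ _ _ _ hne]
  have hmit : m.insert it.1 it.2 = PySem.Dict.mk (m.items ++ [it]) := by
    apply PySem.Dict.ext
    rw [PySem.Dict.items_insert_of_not_contains _ _ hm]
  rw [hmit, pv_insert_append_last _ _ _ _ hne]
  refine Prod.ext (by rfl) (by simp)

theorem pv_ofList_single {κ ν : Type} [BEq κ] (x : κ × ν) :
    PySem.Dict.ofList [x] = PySem.Dict.mk [x] := by
  show PySem.Dict.empty.insert x.1 x.2 = _
  rw [pv_insert_empty]

theorem pv_pages_cons (it : String × String) (rest : List (String × String)) (off : Nat) :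
    pvB_pages (it :: rest) off PySem.Dict.empty =
      PySem.Dict.mk ((pvPageOf off, PySem.Dict.ofList ((it :: rest).take (25 - off % 25))) ::
        (pvB_pages ((it :: rest).drop (25 - off % 25)) (off + (25 - off % 25)) PySem.Dict.empty).items) := by
  rw [pvB_pages]
  set t := 25 - off % 25 with ht
  set chunk := PySem.Dict.ofList ((it :: rest).take t) with hchunk
  have hp : ((off / 25 : Nat) : Int) + 1 = pvPageOf off := by simp [pvPageOf]
  rw [hp, pv_insert_empty]
  have hkeys1 : ∀ k ∈ (PySem.Dict.mk [(pvPageOf off, chunk)]).keys, k < pvPageOf (off + t) := by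
    intro k hkmem
    rw [ht, pv_pageOf_bound off]
    simp [PySem.Dict.keys] at hkmem
    rw [hkmem]; omega
  rw [pv_pages_acc (((it :: rest).drop t).length) _ (le_refl _) (off + t) _ hkeys1]
  rfl

theorem pv_inner (n : Nat) : ∀ (items : List (String × String)), items.length ≤ n →
    (((items.map Prod.fst).Nodup →
      ∀ (o : Nat) (qd : PySem.Dict Int (PySem.Dict String String)),
      (∀ k ∈ qd.keys, k < pvPageOf o) →
      items.foldl pvQdStep (qd, pvPnOf o, (o : Int)) =
        (PySem.Dict.mk (qd.items ++ (pvB_pages items o PySem.Dict.empty).items),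
          pvPnOf (o + items.length), ((o + items.length : Nat) : Int)))
    ∧ ((items.map Prod.fst).Nodup →
      ∀ (o : Nat) (qd : PySem.Dict Int (PySem.Dict String String)) (m : PySem.Dict String String),
      o % 25 ≠ 0 →
      (∀ k ∈ qd.keys, k < pvPageOf o) →
      (∀ u ∈ items.map Prod.fst, m.contains u = false) →
      items.foldl pvQdStep (PySem.Dict.mk (qd.items ++ [(pvPageOf o, m)]), pvPnOf o, (o : Int)) =
        (PySem.Dict.mk (qd.items ++ [(pvPageOf o, PySem.Dict.mk (m.items ++ items.take (25 - o % 25)))]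
            ++ (pvB_pages (items.drop (25 - o % 25)) (o + (25 - o % 25)) PySem.Dict.empty).items),
          pvPnOf (o + items.length), ((o + items.length : Nat) : Int)))) := by
  induction n with
  | zero =>
    intro items hlen
    have : items = [] := List.eq_nil_of_length_eq_zero (Nat.le_zero.mp hlen)
    subst this
    constructor
    · intro _ o qd _
      simp [pvB_pages, PySem.Dict.empty]
    · intro _ o qd m _ _ _
      simp [pvB_pages, PySem.Dict.empty]
  | succ n ih =>
    intro items hlen
    match items with
    | [] =>
      constructor
      · intro _ o qd _
        simp [pvB_pages, PySem.Dict.empty]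
      · intro _ o qd m _ _ _
        simp [pvB_pages, PySem.Dict.empty]
    | it :: rest =>
      have hlen' : rest.length ≤ n := by simp at hlen; omega
      constructor
      -- ===== P1: fresh page boundary state =====
      · intro hnd o qd hk
        have hnd' : (it.1 :: rest.map Prod.fst).Nodup := by simpa using hnd
        have hndr : (rest.map Prod.fst).Nodup := (List.nodup_cons.mp hnd').2
        have hit1 : it.1 ∉ rest.map Prod.fst := (List.nodup_cons.mp hnd').1
        rw [List.foldl_cons, pv_qdstep_fresh o qd hk it]
        by_cases hb : (o + 1) % 25 = 0
        -- page filled by this single item (o % 25 = 24)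
        · have ht1 : 25 - o % 25 = 1 := by omega
          have hpb : pvPageOf (o + 1) = pvPageOf o + 1 := by
            have := pv_pageOf_bound o
            rw [ht1] at this
            exact this
          have hkeys' : ∀ k ∈ (PySem.Dict.mk (qd.items ++ [(pvPageOf o, PySem.Dict.mk [it])])).keys,
              k < pvPageOf (o + 1) := by
            intro k hkmem
            rw [hpb]
            simp only [PySem.Dict.keys, List.map_append, List.mem_append, List.map_cons,
              List.map_nil, List.mem_singleton] at hkmem
            rcases hkmem with h1 | h2
            · have : k ∈ qd.keys := by simp only [PySem.Dict.keys]; exact h1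
              have := hk k this
              omega
            · omega
          rw [(ih rest hlen').1 hndr (o + 1) _ hkeys']
          rw [pv_pages_cons it rest o, ht1]
          simp only [List.take_succ_cons, List.take_zero, List.drop_succ_cons, List.drop_zero,
            pv_ofList_single]
          refine Prod.ext ?_ (by rw [show o + 1 + rest.length = o + (it :: rest).length from by rw [List.length_cons]; omega])
          apply PySem.Dict.ext
          simp
        -- page continues (o % 25 ≠ 24)
        · have hcont : (rest.map Prod.fst).Nodup := hndr
          have hpe : pvPageOf (o + 1) = pvPageOf o := pv_pageOf_succ_eq o hb
          have hmcont : ∀ u ∈ rest.map Prod.fst, (PySem.Dict.mk [it]).contains u = false := by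
            intro u hu
            simp only [PySem.Dict.contains_mk, List.any_cons, List.any_nil, Bool.or_false,
              beq_eq_false_iff_ne, ne_eq]
            exact fun h => hit1 (h ▸ hu)
          have := (ih rest hlen').2 hndr (o + 1) qd (PySem.Dict.mk [it]) hb
            (by rw [hpe]; exact hk) hmcont
          rw [hpe] at this
          rw [this]
          have ht : 25 - o % 25 = (25 - (o + 1) % 25) + 1 := by omega
          rw [pv_pages_cons it rest o, ht]
          simp only [List.take_succ_cons, List.drop_succ_cons]
          have hchunk : PySem.Dict.ofList (it :: rest.take (25 - (o + 1) % 25)) =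
              PySem.Dict.mk (it :: rest.take (25 - (o + 1) % 25)) := by
            apply pv_ofList_nodup
            have hsub : (it.1 :: (rest.map Prod.fst).take (25 - (o + 1) % 25)).Sublist
                (it.1 :: rest.map Prod.fst) := (List.take_sublist _ _).cons₂ _
            have : ((it :: rest.take (25 - (o + 1) % 25)).map Prod.fst) =
                it.1 :: (rest.map Prod.fst).take (25 - (o + 1) % 25) := by
              simp [List.map_take]
            rw [this]
            exact hnd'.sublist hsub
          rw [hchunk]
          refine Prod.ext ?_ (by rw [show o + 1 + rest.length = o + (it :: rest).length from by rw [List.length_cons]; omega])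
          apply PySem.Dict.ext
          show qd.items ++ [(pvPageOf o, PySem.Dict.mk ([it] ++ rest.take (25 - (o + 1) % 25)))] ++ _ = _
      -- arithmetic of offsets
          have hoff : o + 1 + (25 - (o + 1) % 25) = o + (25 - (o + 1) % 25 + 1) := by omega
          rw [hoff]
          simp
      -- ===== P2: partially filled current page =====
      · intro hnd o qd m ho hk hm
        have hnd' : (it.1 :: rest.map Prod.fst).Nodup := by simpa using hnd
        have hndr : (rest.map Prod.fst).Nodup := (List.nodup_cons.mp hnd').2
        have hit1 : it.1 ∉ rest.map Prod.fst := (List.nodup_cons.mp hnd').1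
        have hmit : m.contains it.1 = false := hm it.1 (by simp)
        rw [List.foldl_cons, pv_qdstep_cont o qd m ho hk it hmit]
        by_cases hb : (o + 1) % 25 = 0
        -- this item fills the page
        · have ht1 : 25 - o % 25 = 1 := by omega
          have hpb : pvPageOf (o + 1) = pvPageOf o + 1 := by
            have := pv_pageOf_bound o
            rw [ht1] at this
            exact this
          have hkeys' : ∀ k ∈ (PySem.Dict.mk (qd.items ++ [(pvPageOf o, PySem.Dict.mk (m.items ++ [it]))])).keys,
              k < pvPageOf (o + 1) := by
            intro k hkmem
            rw [hpb]
            simp only [PySem.Dict.keys, List.map_append, List.mem_append, List.map_cons,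
              List.map_nil, List.mem_singleton] at hkmem
            rcases hkmem with h1 | h2
            · have : k ∈ qd.keys := by simp only [PySem.Dict.keys]; exact h1
              have := hk k this
              omega
            · omega
          rw [(ih rest hlen').1 hndr (o + 1) _ hkeys']
          rw [ht1]
          simp only [List.take_succ_cons, List.take_zero, List.drop_succ_cons, List.drop_zero]
          refine Prod.ext ?_ (by rw [show o + 1 + rest.length = o + (it :: rest).length from by rw [List.length_cons]; omega])
          apply PySem.Dict.ext
          simp
        -- page still not full
        · have hpe : pvPageOf (o + 1) = pvPageOf o := pv_pageOf_succ_eq o hb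
          have hmcont : ∀ u ∈ rest.map Prod.fst,
              (PySem.Dict.mk (m.items ++ [it])).contains u = false := by
            intro u hu
            simp only [PySem.Dict.contains_mk, List.any_append, List.any_cons, List.any_nil,
              Bool.or_false, Bool.or_eq_false_iff, beq_eq_false_iff_ne, ne_eq]
            constructor
            · have := hm u (by simp [hu])
              simpa [PySem.Dict.contains] using this
            · exact fun h => hit1 (h ▸ hu)
          have := (ih rest hlen').2 hndr (o + 1) qd (PySem.Dict.mk (m.items ++ [it])) hb
            (by rw [hpe]; exact hk) hmcont
          rw [hpe] at this
          rw [this]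
          have ht : 25 - o % 25 = (25 - (o + 1) % 25) + 1 := by omega
          rw [ht]
          simp only [List.take_succ_cons, List.drop_succ_cons]
          refine Prod.ext ?_ (by rw [show o + 1 + rest.length = o + (it :: rest).length from by rw [List.length_cons]; omega])
          apply PySem.Dict.ext
          have hoff : o + 1 + (25 - (o + 1) % 25) = o + (25 - (o + 1) % 25 + 1) := by omega
          rw [hoff]
          simp

theorem pv_item_commute (q : String)
    (pd : PySem.Dict String (PySem.Dict Int (PySem.Dict String String)))
    (qd : PySem.Dict Int (PySem.Dict String String)) (pn ic : Int) (it : String × String) :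
    pvA_item q (pd.insert q qd, pn, ic) it =
      ((pd.insert q (pvQdStep (qd, pn, ic) it).1), (pvQdStep (qd, pn, ic) it).2) := by
  simp only [pvA_item, pvQdStep, PySem.Dict.modify, PySem.Dict.getD_insert_self]
  split_ifs with h1 h2 <;>
    simp_all [PySem.Dict.getD_insert_self, PySem.Dict.insert_insert_self]

theorem pv_fold_commute (q : String) (items : List (String × String))
    (pd : PySem.Dict String (PySem.Dict Int (PySem.Dict String String)))
    (qd : PySem.Dict Int (PySem.Dict String String)) (pn ic : Int) :
    items.foldl (pvA_item q) (pd.insert q qd, pn, ic) =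
      ((pd.insert q (items.foldl pvQdStep (qd, pn, ic)).1),
        (items.foldl pvQdStep (qd, pn, ic)).2) := by
  induction items generalizing qd pn ic with
  | nil => simp
  | cons x xs ih =>
    simp only [List.foldl_cons]
    rw [show pvA_item q (pd.insert q qd, pn, ic) x =
      ((pd.insert q (pvQdStep (qd, pn, ic) x).1), (pvQdStep (qd, pn, ic) x).2) from
      pv_item_commute q pd qd pn ic x]
    have := ih (pvQdStep (qd, pn, ic) x).1 (pvQdStep (qd, pn, ic) x).2.1 (pvQdStep (qd, pn, ic) x).2.2
    simpa using this

theorem pv_query (off : Nat)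
    (pd : PySem.Dict String (PySem.Dict Int (PySem.Dict String String)))
    (qr : String × PySem.Dict String String)
    (hq : pd.contains qr.1 = false) (hnd : (qr.2.items.map Prod.fst).Nodup) :
    pvA_query (pd, pvPnOf off, (off : Int)) qr =
      (pd.insert qr.1 (pvB_pages qr.2.items off PySem.Dict.empty),
        pvPnOf (off + qr.2.items.length), ((off + qr.2.items.length : Nat) : Int)) := by
  simp only [pvA_query, hq, Bool.false_eq_true, if_false]
  rw [pv_fold_commute qr.1 qr.2.items pd PySem.Dict.empty (pvPnOf off) (off : Int)]
  rw [(pv_inner qr.2.items.length qr.2.items (le_refl _)).1 hnd off PySem.Dict.empty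
    (by simp [PySem.Dict.keys, PySem.Dict.empty])]
  have : PySem.Dict.mk ((PySem.Dict.empty : PySem.Dict Int (PySem.Dict String String)).items ++
      (pvB_pages qr.2.items off PySem.Dict.empty).items) = pvB_pages qr.2.items off PySem.Dict.empty := by
    apply PySem.Dict.ext
    simp [PySem.Dict.empty]
  rw [this]

theorem pv_outer : ∀ (qs : List (String × PySem.Dict String String))
    (pd : PySem.Dict String (PySem.Dict Int (PySem.Dict String String))) (off : Nat),
    (qs.map Prod.fst).Nodup → (∀ p ∈ qs, pd.contains p.1 = false) →
    (∀ p ∈ qs, (p.2.items.map Prod.fst).Nodup) →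
    (qs.foldl pvA_query (pd, pvPnOf off, (off : Int))).1 = (qs.foldl pvB_query (pd, off)).1 := by
  intro qs
  induction qs with
  | nil => intro pd off _ _ _; rfl
  | cons qr qs ih =>
    intro pd off hnd hfresh hinner
    have hnd' : (qr.1 :: qs.map Prod.fst).Nodup := by simpa using hnd
    rw [List.foldl_cons, List.foldl_cons,
      pv_query off pd qr (hfresh qr (by simp)) (hinner qr (by simp))]
    show ((qs.foldl pvA_query (_, pvPnOf (off + qr.2.items.length), ((off + qr.2.items.length : Nat) : Int))).1 = _)
    rw [ih _ (off + qr.2.items.length) (List.nodup_cons.mp hnd').2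
      (fun p hp => by
        rw [PySem.Dict.contains_insert]
        have h1 : p.1 ≠ qr.1 := by
          intro h
          exact (List.nodup_cons.mp hnd').1 (h ▸ List.mem_map_of_mem hp)
        simp [h1, hfresh p (by simp [hp])])
      (fun p hp => hinner p (by simp [hp]))]
    rfl

theorem pv_values_ofList {κ ν : Type} [BEq κ] [LawfulBEq κ] (l : List (κ × ν)) :
    ∀ w ∈ (PySem.Dict.ofList l).values, ∃ x ∈ l, w = x.2 := by
  suffices h : ∀ (d : PySem.Dict κ ν), ∀ w ∈ (l.foldl (fun acc p => acc.insert p.1 p.2) d).values,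
      w ∈ d.values ∨ ∃ x ∈ l, w = x.2 by
    intro w hw
    rcases h PySem.Dict.empty w hw with h1 | h2
    · simp [PySem.Dict.values, PySem.Dict.empty] at h1
    · exact h2
  induction l with
  | nil => intro d w hw; exact Or.inl hw
  | cons x xs ih =>
    intro d w hw
    rcases ih (d.insert x.1 x.2) w hw with h1 | h2
    · rcases PySem.Dict.mem_values_insert d x.1 x.2 w h1 with h | h
      · exact Or.inr ⟨x, by simp, h⟩
      · exact Or.inl h
    · rcases h2 with ⟨y, hy, hw'⟩
      exact Or.inr ⟨y, by simp [hy], hw'⟩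

theorem pv_main (data : List (String × List (String × String))) :
    paginate_data_py data = paginate_data_py_alt data := by
  unfold paginate_data_py paginate_data_py_alt
  set d : PySem.Dict String (PySem.Dict String String) :=
    PySem.Dict.ofList (data.map (fun p => (p.1, PySem.Dict.ofList p.2))) with hd
  have hnd : (d.items.map Prod.fst).Nodup := by
    have := PySem.Dict.nodup_keys_ofList (data.map (fun p => (p.1, PySem.Dict.ofList p.2)))
    simpa [PySem.Dict.keys, hd] using this
  have hfresh : ∀ p ∈ d.items, (PySem.Dict.empty :
      PySem.Dict String (PySem.Dict Int (PySem.Dict String String))).contains p.1 = false := by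
    intro p _
    simp [PySem.Dict.contains_empty]
  have hinner : ∀ p ∈ d.items, (p.2.items.map Prod.fst).Nodup := by
    intro p hp
    have hv : p.2 ∈ d.values := by
      simp only [PySem.Dict.values]
      exact List.mem_map_of_mem hp
    rcases pv_values_ofList _ p.2 hv with ⟨x, hx, hval⟩
    rcases List.mem_map.mp hx with ⟨y, _, hy⟩
    have : p.2 = PySem.Dict.ofList y.2 := by rw [hval, ← hy]
    rw [this]
    have := PySem.Dict.nodup_keys_ofList y.2
    simpa [PySem.Dict.keys] using this
  have h := pv_outer d.items PySem.Dict.empty 0 hnd hfresh hinner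
  have h0 : pvPnOf 0 = 0 := by norm_num [pvPnOf]
  rw [h0] at h
  simp only [Nat.cast_zero] at h
  show List.map _ (List.foldl pvA_query (PySem.Dict.empty, 0, 0) d.items).1.items =
    List.map _ (List.foldl pvB_query (PySem.Dict.empty, 0) d.items).1.items
  rw [h]

-- ===== VERDICT (by name: the statement is the Claim_ definition above) =====
theorem paginate_data_py_spec : Claim_equal_paginate_data_py := by
  intro data _
  show paginate_data_py data = paginate_data_py_alt data
  exact pv_main data
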